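-- pv_equiv track=rewrite | github.com/AlexShcherb1173/LessonsByPYTHON | Курсовая/src/Курс1_Задание10.py | group_products_by_category
-- ===== SOURCE A (Python) =====
-- def group_products_by_category(products):
--   dict_product = {}
--   dict_product["fruit"] = []
--   dict_product["veggie"] = []
--   dict_product["sweets"] = []
--   for product in products:
--       if product.get("category") == "fruit":
--         dict_product["fruit"].append(product)
--       if product.get("category") == "veggie":
--         dict_product["veggie"].append(product)
--       if product.get("category") == "sweets":
--         dict_product["sweets"].append(product)
--   if dict_product["fruit"] == []:
--         del dict_product["fruit"]
--
--   if dict_product["veggie"] == []: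
--         del dict_product["veggie"]
--   if dict_product["sweets"] == []:
--         del dict_product["sweets"]
--   return dict_product
-- ===== SOURCE B (Python) =====
-- def group_products_by_category(products):
--     result = {}
--     for cat in ("fruit", "veggie", "sweets"):
--         group = [p for p in products if p.get("category") == cat]
--         if group:
--             result[cat] = group
--     return result
-- ===== Notes on version B (the rewrite author's own statement) =====
-- stated objective: simpler
-- what changed: Replaces A's single pass with three per-product branches plus a separate delete-empty-keys prune phase by an outer loop over the three category names, each building its group with one comprehension and inserting only non-empty groups, so no prune step exists.
import Mathlib
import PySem

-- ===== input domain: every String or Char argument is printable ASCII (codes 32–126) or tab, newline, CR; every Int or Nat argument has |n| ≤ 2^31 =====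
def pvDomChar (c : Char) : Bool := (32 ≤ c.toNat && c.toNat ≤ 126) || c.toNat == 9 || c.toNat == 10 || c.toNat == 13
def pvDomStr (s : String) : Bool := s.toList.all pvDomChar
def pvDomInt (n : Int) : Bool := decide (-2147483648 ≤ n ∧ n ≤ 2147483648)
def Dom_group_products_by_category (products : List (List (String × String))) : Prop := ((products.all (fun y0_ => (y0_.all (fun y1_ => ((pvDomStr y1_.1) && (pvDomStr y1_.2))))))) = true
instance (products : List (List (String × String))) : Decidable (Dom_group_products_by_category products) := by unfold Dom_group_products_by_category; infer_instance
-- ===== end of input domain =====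

-- B replaces A's single pass with three per-product branches plus a delete-empty-keys prune
-- phase by a loop over the three category names, filtering products per category and
-- inserting only non-empty groups (objective: simpler).

-- ===== PORT A =====
-- product.get("category") is (PySem.Dict.mk product).get? "category" (first-match lookup)
def group_products_by_category (products : List (List (String × String))) : List (String × List (List (String × String))) :=
  let d0 : PySem.Dict String (List (List (String × String))) :=
    ((PySem.Dict.empty.insert "fruit" []).insert "veggie" []).insert "sweets" []
  let d := products.foldl (fun d product =>
    let d := if (PySem.Dict.mk product).get? "category" == some "fruit" then d.modify "fruit" [] (· ++ [product]) else d
    let d := if (PySem.Dict.mk product).get? "category" == some "veggie" then d.modify "veggie" [] (· ++ [product]) else d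
    let d := if (PySem.Dict.mk product).get? "category" == some "sweets" then d.modify "sweets" [] (· ++ [product]) else d
    d) d0
  let d := if d.getD "fruit" [] == [] then d.erase "fruit" else d
  let d := if d.getD "veggie" [] == [] then d.erase "veggie" else d
  let d := if d.getD "sweets" [] == [] then d.erase "sweets" else d
  d.items

-- ===== PORT B =====
def group_products_by_category_alt (products : List (List (String × String))) : List (String × List (List (String × String))) :=
  (["fruit", "veggie", "sweets"].foldl (fun (result : PySem.Dict String (List (List (String × String)))) cat =>
    let group := products.filter (fun p => (PySem.Dict.mk p).get? "category" == some cat)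
    if group.isEmpty then result else result.insert cat group) PySem.Dict.empty).items

-- ===== PRECONDITION & SPEC =====
def Spec_group_products_by_category (products : List (List (String × String))) (out : List (String × List (List (String × String)))) : Prop := out = group_products_by_category_alt products
instance (products : List (List (String × String))) (out : List (String × List (List (String × String)))) : Decidable (Spec_group_products_by_category products out) := by unfold Spec_group_products_by_category; infer_instance

-- ===== CLAIM (what is proved, stated in full; the proofs are below) =====
def Claim_equal_group_products_by_category : Prop := ∀ (products : List (List (String × String))), Dom_group_products_by_category products → Spec_group_products_by_category products (group_products_by_category products)

-- ===== LEMMAS AND PROOFS =====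

theorem pv_mod_fruit (F V S L : List (List (String × String))) :
    (PySem.Dict.mk [("fruit",F),("veggie",V),("sweets",S)]).modify "fruit" [] (· ++ L)
      = PySem.Dict.mk [("fruit",F++L),("veggie",V),("sweets",S)] := by
  simp [PySem.Dict.modify, PySem.Dict.getD, PySem.Dict.get?, PySem.Dict.insert, PySem.Dict.contains]

theorem pv_mod_veggie (F V S L : List (List (String × String))) :
    (PySem.Dict.mk [("fruit",F),("veggie",V),("sweets",S)]).modify "veggie" [] (· ++ L)
      = PySem.Dict.mk [("fruit",F),("veggie",V++L),("sweets",S)] := by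
  simp [PySem.Dict.modify, PySem.Dict.getD, PySem.Dict.get?, PySem.Dict.insert, PySem.Dict.contains]

theorem pv_mod_sweets (F V S L : List (List (String × String))) :
    (PySem.Dict.mk [("fruit",F),("veggie",V),("sweets",S)]).modify "sweets" [] (· ++ L)
      = PySem.Dict.mk [("fruit",F),("veggie",V),("sweets",S++L)] := by
  simp [PySem.Dict.modify, PySem.Dict.getD, PySem.Dict.get?, PySem.Dict.insert, PySem.Dict.contains]

-- A's loop turns the 3-key dict into the three category filters appended to the accumulators.
theorem pv_loopA (ps : List (List (String × String)))
    (F V S : List (List (String × String))) :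
    ps.foldl (fun d product =>
      let d := if (PySem.Dict.mk product).get? "category" == some "fruit" then d.modify "fruit" [] (· ++ [product]) else d
      let d := if (PySem.Dict.mk product).get? "category" == some "veggie" then d.modify "veggie" [] (· ++ [product]) else d
      let d := if (PySem.Dict.mk product).get? "category" == some "sweets" then d.modify "sweets" [] (· ++ [product]) else d
      d) (PySem.Dict.mk [("fruit", F), ("veggie", V), ("sweets", S)]) =
    PySem.Dict.mk [("fruit", F ++ ps.filter (fun p => (PySem.Dict.mk p).get? "category" == some "fruit")),
                   ("veggie", V ++ ps.filter (fun p => (PySem.Dict.mk p).get? "category" == some "veggie")),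
                   ("sweets", S ++ ps.filter (fun p => (PySem.Dict.mk p).get? "category" == some "sweets"))] := by
  induction ps generalizing F V S with
  | nil => simp
  | cons p ps ih =>
    simp only [List.foldl_cons, List.filter_cons]
    by_cases h1 : ((PySem.Dict.mk p).get? "category" == some "fruit") = true <;>
      by_cases h2 : ((PySem.Dict.mk p).get? "category" == some "veggie") = true <;>
      by_cases h3 : ((PySem.Dict.mk p).get? "category" == some "sweets") = true
    · simp at h1 h2; rw [h1] at h2; simp at h2
    · simp at h1 h2; rw [h1] at h2; simp at h2
    · simp at h1 h3; rw [h1] at h3; simp at h3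
    · simp only [h1, h2, h3, Bool.false_eq_true, pv_mod_fruit, reduceIte]
      rw [ih]
      simp
    · simp at h2 h3; rw [h2] at h3; simp at h3
    · simp only [h1, h2, h3, Bool.false_eq_true, pv_mod_veggie, reduceIte]
      rw [ih]
      simp
    · simp only [h1, h2, h3, Bool.false_eq_true, pv_mod_sweets, reduceIte]
      rw [ih]
      simp
    · simp only [h1, h2, h3, Bool.false_eq_true, reduceIte]
      rw [ih]

-- ===== VERDICT (by name: the statement is the Claim_ definition above) =====
theorem group_products_by_category_spec : Claim_equal_group_products_by_category := by
  intro products _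
  unfold Spec_group_products_by_category
  simp only [group_products_by_category, group_products_by_category_alt, List.foldl_cons,
    List.foldl_nil]
  have hd0 : (((PySem.Dict.empty.insert "fruit" []).insert "veggie" []).insert "sweets" [] :
      PySem.Dict String (List (List (String × String)))) =
      PySem.Dict.mk [("fruit", []), ("veggie", []), ("sweets", [])] := by
    simp [PySem.Dict.insert, PySem.Dict.empty, PySem.Dict.contains]
  rw [hd0, pv_loopA]
  simp only [List.nil_append]
  set Fg := products.filter (fun p => (PySem.Dict.mk p).get? "category" == some "fruit") with hF
  set Vg := products.filter (fun p => (PySem.Dict.mk p).get? "category" == some "veggie") with hV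
  set Sg := products.filter (fun p => (PySem.Dict.mk p).get? "category" == some "sweets") with hS
  by_cases hf : Fg = [] <;> by_cases hv : Vg = [] <;> by_cases hs : Sg = [] <;>
    simp [hf, hv, hs, PySem.Dict.getD, PySem.Dict.get?, PySem.Dict.erase,
      PySem.Dict.insert, PySem.Dict.contains, PySem.Dict.empty, List.isEmpty_iff]
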